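-- pv_equiv track=rewrite | github.com/s51bw/sdrangel-rxtx-sync | rxtxsync.py | find_channel_settings_key
-- ===== SOURCE A (Python) =====
-- def find_channel_settings_key(channel_json, role='demod', kind_hint='ssb'):
--     """
--     Find the key in channel JSON that corresponds to the settings we need.
--     role: 'demod' or 'mod' (searches for keys ending with 'DemodSettings' or 'ModSettings')
--     kind_hint: e.g. 'ssb' to prefer SSB-specific keys.
--     Returns the exact key name (case preserved) or None.
--     """
--     role_part = role.lower()
--     # Collect candidate keys
--     candidates = []
--     for k in channel_json.keys():
--         lk = k.lower()
--         if lk.endswith('settings') and role_part in lk: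
--             candidates.append(k)
--     # Prefer those containing kind_hint
--     if kind_hint:
--         for k in candidates:
--             if kind_hint.lower() in k.lower():
--                 return k
--     if candidates:
--         return candidates[0]
--     # If nothing found, try any '*Settings' key (last resort)
--     for k in channel_json.keys():
--         if k.lower().endswith('settings'):
--             return k
--     return None
-- ===== SOURCE B (Python) =====
-- def find_channel_settings_key(channel_json, role='demod', kind_hint='ssb'):
--     """Single-pass re-implementation: one traversal of the keys maintaining the
--     first kind-matching candidate, the first role-matching candidate and the
--     first '*settings' key, then coalesce by priority."""
--     role_part = role.lower()
--     kind_part = kind_hint.lower()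
--     use_kind = bool(kind_hint)
--     first_kind = None
--     first_candidate = None
--     first_any = None
--     for k in channel_json.keys():
--         lk = k.lower()
--         if lk.endswith('settings'):
--             if first_any is None:
--                 first_any = k
--             if role_part in lk:
--                 if first_candidate is None:
--                     first_candidate = k
--                 if use_kind and first_kind is None and kind_part in lk:
--                     first_kind = k
--     if first_kind is not None:
--         return first_kind
--     if first_candidate is not None:
--         return first_candidate
--     return first_any
-- ===== Notes on version B (the rewrite author's own statement) =====
-- stated objective: alternative
-- what changed: Replaced A's collect-candidates pass plus two rescans (kind loop, fallback loop) by a single traversal of the keys that maintains the first kind match, first role candidate and first '*settings' key, coalesced by priority at the end.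
import Mathlib
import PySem

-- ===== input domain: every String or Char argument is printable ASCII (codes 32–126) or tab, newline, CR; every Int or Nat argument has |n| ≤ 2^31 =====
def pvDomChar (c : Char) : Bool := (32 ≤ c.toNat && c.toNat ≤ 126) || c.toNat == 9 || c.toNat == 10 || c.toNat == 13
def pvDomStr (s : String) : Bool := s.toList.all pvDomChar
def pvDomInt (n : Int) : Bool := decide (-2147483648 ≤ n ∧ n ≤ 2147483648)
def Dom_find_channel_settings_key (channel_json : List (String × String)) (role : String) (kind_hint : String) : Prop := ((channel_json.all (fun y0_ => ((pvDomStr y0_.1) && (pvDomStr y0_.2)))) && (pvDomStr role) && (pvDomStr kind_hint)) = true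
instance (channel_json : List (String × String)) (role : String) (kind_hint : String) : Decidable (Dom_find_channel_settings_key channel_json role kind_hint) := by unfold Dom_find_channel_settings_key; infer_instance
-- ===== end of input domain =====

-- B fuses A's candidate-collection pass plus its two rescans into a single traversal
-- of the keys maintaining three "first match" accumulators (objective: single pass).


-- ===== PORT A =====
-- the 'for k in candidates: if kind_hint.lower() in k.lower(): return k' loop
def fcskA_kindLoop (kind_hint : String) : List String → Option String
  | [] => none
  | k :: t =>
    if PySem.Str.isIn (PySem.Str.lower kind_hint) (PySem.Str.lower k) then some k
    else fcskA_kindLoop kind_hint t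

-- the last-resort 'for k in channel_json.keys(): if k.lower().endswith("settings"): return k' loop
def fcskA_anyLoop : List String → Option String
  | [] => none
  | k :: t =>
    if PySem.Str.endswith (PySem.Str.lower k) "settings" then some k
    else fcskA_anyLoop t

def find_channel_settings_key (channel_json : List (String × String)) (role : String) (kind_hint : String) : Option String :=
  let role_part := PySem.Str.lower role
  let keys := PySem.List.dedup (channel_json.map Prod.fst)   -- dict keys: first-occurrence order
  let candidates := keys.foldl (fun acc k =>
    let lk := PySem.Str.lower k
    if PySem.Str.endswith lk "settings" && PySem.Str.isIn role_part lk then acc ++ [k] else acc) []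
  match (if kind_hint ≠ "" then fcskA_kindLoop kind_hint candidates else none) with
  | some k => some k
  | none =>
    match candidates with
    | k :: _ => some k
    | [] => fcskA_anyLoop keys

-- ===== PORT B =====
-- single pass: (first_kind, first_candidate, first_any)
def fcskB_scan (role_part kind_part : String) (use_kind : Bool) :
    List String → Option String → Option String → Option String →
    Option String × Option String × Option String
  | [], fk, fc, fa => (fk, fc, fa)
  | k :: t, fk, fc, fa =>
    let lk := PySem.Str.lower k
    if PySem.Str.endswith lk "settings" then
      let fa' := if fa.isNone then some k else fa
      if PySem.Str.isIn role_part lk then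
        let fc' := if fc.isNone then some k else fc
        let fk' := if use_kind && fk.isNone && PySem.Str.isIn kind_part lk then some k else fk
        fcskB_scan role_part kind_part use_kind t fk' fc' fa'
      else fcskB_scan role_part kind_part use_kind t fk fc fa'
    else fcskB_scan role_part kind_part use_kind t fk fc fa

def find_channel_settings_key_alt (channel_json : List (String × String)) (role : String) (kind_hint : String) : Option String :=
  let role_part := PySem.Str.lower role
  let kind_part := PySem.Str.lower kind_hint
  let r := fcskB_scan role_part kind_part (kind_hint ≠ "")
    (PySem.List.dedup (channel_json.map Prod.fst)) none none none
  match r.1 with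
  | some k => some k
  | none =>
    match r.2.1 with
    | some k => some k
    | none => r.2.2

-- ===== PRECONDITION & SPEC =====
def Spec_find_channel_settings_key (channel_json : List (String × String)) (role : String) (kind_hint : String) (out : Option String) : Prop := out = find_channel_settings_key_alt channel_json role kind_hint
instance (channel_json : List (String × String)) (role : String) (kind_hint : String) (out : Option String) : Decidable (Spec_find_channel_settings_key channel_json role kind_hint out) := by unfold Spec_find_channel_settings_key; infer_instance

-- ===== CLAIM (what is proved, stated in full; the proofs are below) =====
def Claim_equal_find_channel_settings_key : Prop := ∀ (channel_json : List (String × String)) (role : String) (kind_hint : String), Dom_find_channel_settings_key channel_json role kind_hint → Spec_find_channel_settings_key channel_json role kind_hint (find_channel_settings_key channel_json role kind_hint)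

-- ===== LEMMAS AND PROOFS =====

theorem fcskA_kindLoop_eq_find? (kh : String) (l : List String) :
    fcskA_kindLoop kh l = l.find? (fun k => PySem.Str.isIn (PySem.Str.lower kh) (PySem.Str.lower k)) := by
  induction l with
  | nil => rfl
  | cons k t ih => simp [fcskA_kindLoop, List.find?, ih]; split <;> simp_all

theorem fcskA_anyLoop_eq_find? (l : List String) :
    fcskA_anyLoop l = l.find? (fun k => PySem.Str.endswith (PySem.Str.lower k) "settings") := by
  induction l with
  | nil => rfl
  | cons k t ih => simp [fcskA_anyLoop, List.find?, ih]; split <;> simp_all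

theorem fcskB_scan_eq (rp kp : String) (uk : Bool) (l : List String)
    (fk fc fa : Option String) :
    fcskB_scan rp kp uk l fk fc fa =
      ( fk.or (if uk then (l.filter (fun k => PySem.Str.endswith (PySem.Str.lower k) "settings" && PySem.Str.isIn rp (PySem.Str.lower k))).find? (fun k => PySem.Str.isIn kp (PySem.Str.lower k)) else none),
        fc.or (l.find? (fun k => PySem.Str.endswith (PySem.Str.lower k) "settings" && PySem.Str.isIn rp (PySem.Str.lower k))),
        fa.or (l.find? (fun k => PySem.Str.endswith (PySem.Str.lower k) "settings")) ) := by
  induction l generalizing fk fc fa with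
  | nil => simp [fcskB_scan]
  | cons k t ih =>
    simp only [fcskB_scan]
    by_cases hs : PySem.Str.endswith (PySem.Str.lower k) "settings"
    · by_cases hr : PySem.Str.isIn rp (PySem.Str.lower k)
      · simp only [hs, hr, if_pos, ih, List.filter_cons, List.find?_cons]
        cases fk <;> cases fc <;> cases fa <;> cases uk <;>
          by_cases hk : PySem.Str.isIn kp (PySem.Str.lower k) <;>
          simp_all [Option.or]
      · simp only [hs, hr, if_pos, ih, List.filter_cons, List.find?_cons]
        cases fa <;> simp_all [Option.or]
    · simp only [hs, ih, List.filter_cons, List.find?_cons]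
      simp_all [Option.or]

-- ===== VERDICT (by name: the statement is the Claim_ definition above) =====
theorem find_channel_settings_key_spec : Claim_equal_find_channel_settings_key := by
  intro cj role kh _
  unfold Spec_find_channel_settings_key find_channel_settings_key find_channel_settings_key_alt
  simp only [fcskB_scan_eq, fcskA_kindLoop_eq_find?, fcskA_anyLoop_eq_find?,
    PySem.List.foldl_append_if_eq_filter, List.nil_append, Option.none_or]
  set keys := PySem.List.dedup (cj.map Prod.fst)
  set cand := fun k => PySem.Str.endswith (PySem.Str.lower k) "settings" && PySem.Str.isIn (PySem.Str.lower role) (PySem.Str.lower k) with hcand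
  by_cases huk : kh = ""
  · simp only [huk, ne_eq, not_true_eq_false, if_false]
    cases hf : keys.filter cand with
    | nil => simp [← List.head?_filter, hf]
    | cons a t => simp [← List.head?_filter, hf]
  · simp only [ne_eq, huk, not_false_eq_true, if_true]
    cases hfk : (keys.filter cand).find? (fun k => PySem.Str.isIn (PySem.Str.lower kh) (PySem.Str.lower k)) with
    | some k => simp
    | none =>
      cases hf : keys.filter cand with
      | nil => simp [← List.head?_filter, hf]
      | cons a t => simp [← List.head?_filter, hf]
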